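-- pv_equiv track=rewrite | github.com/Geniolle/Trader-Bot | gerar_mapa_projeto.py | build_tree
-- ===== SOURCE A (Python) =====
-- def build_tree(paths: list[str]) -> str:
--     tree: dict[str, dict] = {}
--     for path in paths:
--         node = tree
--         for part in path.split("/"):
--             node = node.setdefault(part, {})
--     lines: list[str] = []
--
--     def walk(subtree: dict, prefix: str = "") -> None:
--         items = sorted(subtree.items(), key=lambda item: (not item[1], item[0].lower()))
--         for index, (name, child) in enumerate(items):
--             connector = "└── " if index == len(items) - 1 else "├── "
--             lines.append(prefix + connector + name)
--             extension = "    " if index == len(items) - 1 else "│   "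
--             walk(child, prefix + extension)
--
--     walk(tree)
--     return "\n".join(lines)
-- ===== SOURCE B (Python) =====
-- def build_tree(paths: list[str]) -> str:
--     tree: dict[str, dict] = {}
--     for path in paths:
--         node = tree
--         for part in path.split("/"):
--             node = node.setdefault(part, {})
--     lines: list[str] = []
--
--     def entries(subtree: dict, prefix: str) -> list[tuple[str, dict, str]]:
--         items = sorted(subtree.items(), key=lambda item: (not item[1], item[0].lower()))
--         n = len(items)
--         return [
--             (prefix + ("└── " if i == n - 1 else "├── ") + name,
--              child,
--              prefix + ("    " if i == n - 1 else "│   "))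
--             for i, (name, child) in enumerate(items)
--         ]
--
--     stack = list(reversed(entries(tree, "")))
--     while stack:
--         line, child, child_prefix = stack.pop()
--         lines.append(line)
--         stack.extend(reversed(entries(child, child_prefix)))
--     return "\n".join(lines)
-- ===== Notes on version B (the rewrite author's own statement) =====
-- stated objective: alternative
-- what changed: The recursive walk over the nested dict is replaced by an explicit stack-based iterative DFS: each stack frame carries a fully rendered line, its child subtree and the child prefix, and children are pushed in reverse sorted order so they pop in the original top-to-bottom order.
import Mathlib
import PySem

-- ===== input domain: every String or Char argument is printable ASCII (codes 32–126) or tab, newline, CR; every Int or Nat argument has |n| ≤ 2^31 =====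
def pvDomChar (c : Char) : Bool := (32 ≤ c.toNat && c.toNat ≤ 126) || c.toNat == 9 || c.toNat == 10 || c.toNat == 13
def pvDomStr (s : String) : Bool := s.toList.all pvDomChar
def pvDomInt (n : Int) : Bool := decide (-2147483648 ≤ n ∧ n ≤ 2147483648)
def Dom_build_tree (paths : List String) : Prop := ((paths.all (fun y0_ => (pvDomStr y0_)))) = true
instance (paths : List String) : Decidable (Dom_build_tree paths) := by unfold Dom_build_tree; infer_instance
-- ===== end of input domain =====

-- B replaces A's recursive walk over the nested tree by an explicit stack-based DFS
-- (children pushed in reverse sorted order); objective: alternative decomposition, same cost.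

-- ===== PORT A =====
-- The Python nested dict[str, dict] is modelled by the inductive PF: a forest in
-- insertion order; `PF.node name child rest` is one entry (name ↦ child) followed by
-- the remaining entries `rest`.  This hand-rolled representation is exact for this
-- program: only string keys, values are again such dicts, insertion order is kept
-- (setdefault appends new keys at the end and never reorders existing ones).
inductive PF : Type
  | nil : PF
  | node : String → PF → PF → PF
deriving DecidableEq, Repr

-- subtree.items() in insertion order
def PFtoList : PF → List (String × PF)
  | PF.nil => []
  | PF.node n c r => (n, c) :: PFtoList r

-- Python truthiness `not child` (empty dict ↦ True)
def PFisNil : PF → Bool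
  | PF.nil => true
  | _ => false

-- the inner `for part in parts: node = node.setdefault(part, {})` walk, written as
-- the purely functional insertion of one split path (exact: setdefault returns the
-- existing subtree or appends a fresh empty one at the end)
def pfInsert : PF → List String → PF
  | f, [] => f
  | PF.nil, p :: ps => PF.node p (pfInsert PF.nil ps) PF.nil
  | PF.node n c r, p :: ps =>
      if n = p then PF.node n (pfInsert c ps) r
      else PF.node n c (pfInsert r (p :: ps))
termination_by f l => (l.length, sizeOf f)

-- the build phase: tree = {}; for path in paths: … (shared verbatim by both ports)
def buildForest (paths : List String) : PF :=
  paths.foldl (fun t path => pfInsert t ((PySem.Str.split? path "/").getD [])) PF.nil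

-- size measures used only for termination of the two traversals
def szF : PF → Nat
  | PF.nil => 0
  | PF.node _ c r => 1 + szF c + szF r

def szL (l : List (String × PF)) : Nat := (l.map (fun it => 1 + szF it.2)).sum

theorem szL_toList (f : PF) : szL (PFtoList f) = szF f := by
  induction f with
  | nil => rfl
  | node n c r ihc ihr => simp [PFtoList, szL, szF] at ihr ⊢; omega

theorem szL_perm {l l' : List (String × PF)} (h : l.Perm l') : szL l = szL l' := by
  simpa [szL] using (h.map (fun it => 1 + szF it.2)).sum_eq

theorem szL_sorted2 (f : PF) :
    szL (PySem.List.sorted2 (PFtoList f) (fun it => PFisNil it.2)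
          (fun it => PySem.Str.lower it.1)) = szF f := by
  rw [szL_perm (PySem.List.sorted2_perm _ _ _ _), szL_toList]

-- A's recursive walk; the shared mutable `lines` list becomes the returned line list,
-- the `for index, (name, child) in enumerate(items)` loop becomes walkAItems carrying
-- the running index i and n = len(items).
mutual
def walkA (f : PF) (pfx : String) : List String :=
  let items := PySem.List.sorted2 (PFtoList f) (fun it => PFisNil it.2)
                 (fun it => PySem.Str.lower it.1)
  walkAItems items 0 items.length pfx
termination_by (szF f, 1)
decreasing_by simp only [szL_sorted2]; exact Prod.Lex.right _ (by omega)
def walkAItems : List (String × PF) → Nat → Nat → String → List String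
  | [], _, _, _ => []
  | (name, child) :: rest, i, n, pfx =>
      (pfx ++ (if i = n - 1 then "└── " else "├── ") ++ name)
        :: (walkA child (pfx ++ (if i = n - 1 then "    " else "│   "))
            ++ walkAItems rest (i + 1) n pfx)
termination_by l _ _ _ => (szL l, 0)
decreasing_by
  · simp [szL]; omega
  · simp [szL]; omega
end

def build_tree (paths : List String) : String :=
  PySem.Str.join "\n" (walkA (buildForest paths) "")

-- ===== PORT B =====
-- Source B's `entries(subtree, prefix)`: one list comprehension over enumerate(items)
def entriesB (f : PF) (pfx : String) : List (String × PF × String) :=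
  let items := PySem.List.sorted2 (PFtoList f) (fun it => PFisNil it.2)
                 (fun it => PySem.Str.lower it.1)
  let n : Int := items.length
  (PySem.List.enumerate items).map (fun e =>
    (pfx ++ (if e.1 = n - 1 then "└── " else "├── ") ++ e.2.1,
     e.2.2,
     pfx ++ (if e.1 = n - 1 then "    " else "│   ")))

def stSz (st : List (String × PF × String)) : Nat :=
  (st.map (fun e => 1 + szF e.2.1)).sum

theorem stSz_append (a b : List (String × PF × String)) :
    stSz (a ++ b) = stSz a + stSz b := by
  simp [stSz]

theorem stSz_entriesB (f : PF) (pfx : String) : stSz (entriesB f pfx) = szF f := by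
  have h : ∀ (l : List (String × PF)) (s : Int) (g : Int × String × PF → String)
      (g' : Int × String × PF → String),
      stSz ((PySem.List.enumerate l s).map (fun e => (g e, e.2.2, g' e))) = szL l := by
    intro l
    induction l with
    | nil => intro s g g'; rfl
    | cons x xs ih =>
        intro s g g'
        simp [PySem.List.enumerate_cons, stSz, szL] at ih ⊢
        exact ih (s + 1) _ _
  unfold entriesB
  rw [h]
  exact szL_sorted2 f
-- Source B's while-loop over the explicit stack; the Python stack has its top at the END
-- (pop() / extend(reversed(new))), modelled here with the top at the HEAD, so
-- "extend with reversed(new)" is exactly "prepend new in forward order".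
def dfsB : List (String × PF × String) → List String → List String
  | [], lines => lines
  | (line, child, cpfx) :: rest, lines =>
      dfsB (entriesB child cpfx ++ rest) (lines ++ [line])
termination_by st _ => stSz st
decreasing_by rw [stSz_append, stSz_entriesB]; simp [stSz]

def build_tree_alt (paths : List String) : String :=
  PySem.Str.join "\n" (dfsB (entriesB (buildForest paths) "") [])

-- ===== PRECONDITION & SPEC =====
def Spec_build_tree (paths : List String) (out : String) : Prop := out = build_tree_alt paths
instance (paths : List String) (out : String) : Decidable (Spec_build_tree paths out) := by unfold Spec_build_tree; infer_instance

-- ===== CLAIM (what is proved, stated in full; the proofs are below) =====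
def Claim_equal_build_tree : Prop := ∀ (paths : List String), Dom_build_tree paths → Spec_build_tree paths (build_tree paths)

-- ===== LEMMAS AND PROOFS =====
-- what one B-stack entry contributes to the output, in A's terms
def emitE (e : String × PF × String) : List String := e.1 :: walkA e.2.1 e.2.2

theorem flat_enum (l : List (String × PF)) : ∀ (i n : Nat) (pfx : String),
    i + l.length = n →
    (((PySem.List.enumerate l (i : Int)).map (fun e =>
        (pfx ++ (if e.1 = (n : Int) - 1 then "└── " else "├── ") ++ e.2.1,
         e.2.2,
         pfx ++ (if e.1 = (n : Int) - 1 then "    " else "│   ")))).map emitE).flatten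
      = walkAItems l i n pfx := by
  induction l with
  | nil => intro i n pfx h; simp [PySem.List.enumerate, walkAItems]
  | cons hd rest ih =>
      intro i n pfx h
      obtain ⟨name, child⟩ := hd
      have hc : ((i : Int) = (n : Int) - 1) ↔ (i = n - 1) := by
        simp only [List.length_cons] at h; omega
      rw [PySem.List.enumerate_cons]
      simp only [List.map_cons, List.flatten_cons, emitE]
      simp only [hc]
      have hcast : ((i : Int) + 1) = ((i + 1 : Nat) : Int) := by push_cast; ring
      rw [hcast, ih (i + 1) n pfx (by simp only [List.length_cons] at h; omega)]
      simp [walkAItems]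

theorem flat_entriesB (f : PF) (pfx : String) :
    ((entriesB f pfx).map emitE).flatten = walkA f pfx := by
  simp only [entriesB, walkA]
  have := flat_enum (PySem.List.sorted2 (PFtoList f) (fun it => PFisNil it.2)
      (fun it => PySem.Str.lower it.1)) 0 (PySem.List.sorted2 (PFtoList f)
      (fun it => PFisNil it.2) (fun it => PySem.Str.lower it.1)).length pfx (by simp)
  simpa using this

theorem dfsB_eq (st : List (String × PF × String)) (lines : List String) :
    dfsB st lines = lines ++ (st.map emitE).flatten := by
  fun_induction dfsB with
  | case1 lines => simp
  | case2 line child cpfx rest lines ih =>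
      rw [ih]
      simp [emitE, flat_entriesB]

-- ===== VERDICT (by name: the statement is the Claim_ definition above) =====
theorem build_tree_spec : Claim_equal_build_tree := by
  intro paths _
  unfold Spec_build_tree build_tree build_tree_alt
  rw [dfsB_eq, flat_entriesB]
  rfl
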